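-- pv_equiv track=rewrite | github.com/t0r1n88/Lachesis | mental_state/shmelev_osr_razuvaeva.py | calc_value_af
-- ===== SOURCE A (Python) =====
-- def calc_value_af(row):
--     """
--     Функция для подсчета значения
--     :return: число
--     """
--     lst_pr = [19,21]
--     value_forward = 0  # результат
--     for idx, value in enumerate(row,1):
--         if idx in lst_pr:
--             if value == 1:
--                 value_forward += 1
--
--     return value_forward
-- ===== SOURCE B (Python) =====
-- def calc_value_af(row):
--     """
--     Функция для подсчета значения
--     :return: число
--     """
--     n = len(row)
--     return sum(1 for i in (18, 20) if i < n and row[i] == 1)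
-- ===== Notes on version B (the rewrite author's own statement) =====
-- stated objective: faster
-- what changed: Replaces the full-row enumerate scan with direct bounds-checked access to the two relevant 0-indexed positions 18 and 20, counting those equal to 1.
import Mathlib
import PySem

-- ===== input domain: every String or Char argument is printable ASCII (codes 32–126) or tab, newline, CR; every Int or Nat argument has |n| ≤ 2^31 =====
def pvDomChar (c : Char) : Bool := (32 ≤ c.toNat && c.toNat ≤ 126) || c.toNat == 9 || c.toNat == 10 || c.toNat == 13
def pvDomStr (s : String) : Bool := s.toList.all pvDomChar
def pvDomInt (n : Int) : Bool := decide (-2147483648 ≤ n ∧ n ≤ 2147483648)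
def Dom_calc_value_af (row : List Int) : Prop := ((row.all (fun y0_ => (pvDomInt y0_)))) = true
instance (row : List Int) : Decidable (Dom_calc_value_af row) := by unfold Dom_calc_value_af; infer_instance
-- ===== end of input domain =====

-- B replaces A's full-row enumerate scan by direct bounds-checked access to the two relevant positions (O(1) vs O(n)).


-- ===== PORT A =====
def calc_value_af (row : List Int) : Int :=
  (PySem.List.enumerate row 1).foldl
    (fun acc p => if p.1 ∈ ([19, 21] : List Int) then (if p.2 = 1 then acc + 1 else acc) else acc) 0

-- ===== PORT B =====
def calc_value_af_alt (row : List Int) : Int :=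
  ([18, 20] : List Int).foldl
    (fun acc i => if i < (row.length : Int) ∧ PySem.List.pyGet? row i = some 1 then acc + 1 else acc) 0

-- ===== PRECONDITION & SPEC =====
def Spec_calc_value_af (row : List Int) (out : Int) : Prop := out = calc_value_af_alt row
instance (row : List Int) (out : Int) : Decidable (Spec_calc_value_af row out) := by unfold Spec_calc_value_af; infer_instance

-- ===== CLAIM (what is proved, stated in full; the proofs are below) =====
def Claim_equal_calc_value_af : Prop := ∀ (row : List Int), Dom_calc_value_af row → Spec_calc_value_af row (calc_value_af row)

-- ===== LEMMAS AND PROOFS =====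

/-- value contributed by 0-indexed position `i` of `row`: 1 iff it exists and equals 1 -/
def hAux (row : List Int) (i : Int) : Int :=
  if 0 ≤ i ∧ row[i.toNat]? = some 1 then 1 else 0

lemma hAux_nil (i : Int) : hAux [] i = 0 := by
  simp [hAux]

lemma hAux_cons (x : Int) (xs : List Int) (i : Int) :
    hAux (x :: xs) i = if i = 0 then (if x = 1 then 1 else 0) else hAux xs (i - 1) := by
  unfold hAux
  by_cases h0 : i = 0
  · subst h0; simp
  · by_cases hp : 0 < i
    · have ht : i.toNat = (i - 1).toNat + 1 := by omega
      rw [ht]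
      simp only [List.getElem?_cons_succ]
      have : (0 ≤ i) = (0 ≤ i - 1) := by
        apply propext; omega
      simp [h0, this]
    · have h1 : ¬ (0 ≤ i) := by omega
      have h2 : ¬ (0 ≤ i - 1) := by omega
      simp [h0, h1]; omega

lemma hAux_neg (xs : List Int) (i : Int) (h : i < 0) : hAux xs i = 0 := by
  unfold hAux
  have : ¬ (0 ≤ i) := by omega
  simp [this]

lemma enum_count (row : List Int) : ∀ (s acc : Int),
    (PySem.List.enumerate row s).foldl
      (fun acc p => if p.1 ∈ ([19, 21] : List Int) then (if p.2 = 1 then acc + 1 else acc) else acc) acc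
    = acc + hAux row (19 - s) + hAux row (21 - s) := by
  induction row with
  | nil => intro s acc; simp [PySem.List.enumerate_nil, hAux_nil]
  | cons x xs ih =>
    intro s acc
    rw [PySem.List.enumerate_cons, List.foldl_cons, ih (s + 1)]
    rw [hAux_cons x xs (19 - s), hAux_cons x xs (21 - s)]
    have e19 : 19 - s - 1 = 19 - (s + 1) := by ring
    have e21 : 21 - s - 1 = 21 - (s + 1) := by ring
    rw [e19, e21]
    by_cases h19 : s = 19
    · subst h19
      have hneg : hAux xs (19 - (19 + 1)) = 0 := hAux_neg xs _ (by norm_num)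
      simp only [List.mem_cons]
      norm_num
      norm_num at hneg
      rw [hneg]
      split_ifs <;> omega
    · by_cases h21 : s = 21
      · subst h21
        have hneg : hAux xs (19 - (21 + 1)) = 0 := hAux_neg xs _ (by norm_num)
        have hneg2 : hAux xs (21 - (21 + 1)) = 0 := hAux_neg xs _ (by norm_num)
        simp only [List.mem_cons]
        norm_num
        norm_num at hneg hneg2
        rw [hneg, hneg2]
        split_ifs <;> omega
      · have n19 : ¬ ((19 : Int) - s = 0) := by omega
        have n21 : ¬ ((21 : Int) - s = 0) := by omega
        simp only [List.mem_cons]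
        have hs : ¬ (s = 19 ∨ s = 21) := by tauto
        simp [hs, n19, n21]

lemma pos_cond (row : List Int) (n : Nat) :
    (((n : Int) < (row.length : Int) ∧ PySem.List.pyGet? row (n : Int) = some 1)) ↔
      row[n]? = some 1 := by
  rw [PySem.List.pyGet?_natCast]
  constructor
  · rintro ⟨_, h⟩; exact h
  · intro h
    have := List.getElem?_eq_some_iff.mp h
    exact ⟨by exact_mod_cast this.1, h⟩

lemma alt_eq (row : List Int) : calc_value_af_alt row = hAux row 18 + hAux row 20 := by
  unfold calc_value_af_alt
  simp only [List.foldl_cons, List.foldl_nil]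
  have h18 := pos_cond row 18
  have h20 := pos_cond row 20
  norm_num at h18 h20
  have a18 : hAux row 18 = if row[(18:Nat)]? = some 1 then 1 else 0 := by
    unfold hAux
    have h : (Int.toNat 18) = 18 := by decide
    rw [h]; norm_num
  have a20 : hAux row 20 = if row[(20:Nat)]? = some 1 then 1 else 0 := by
    unfold hAux
    have h : (Int.toNat 20) = 20 := by decide
    rw [h]; norm_num
  rw [a18, a20]
  by_cases c18 : row[(18:Nat)]? = some 1 <;> by_cases c20 : row[(20:Nat)]? = some 1 <;>
    simp [h18, h20, c18, c20]

-- ===== VERDICT (by name: the statement is the Claim_ definition above) =====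
theorem calc_value_af_spec : Claim_equal_calc_value_af := by
  intro row _
  unfold Spec_calc_value_af calc_value_af
  rw [enum_count row 1 0, alt_eq]
  norm_num
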